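-- pv_equiv track=rewrite | github.com/andydiaz122/Kalshi_Quant | kalshi_qete/src/utils/orderbook.py | format_orderbook_display
-- ===== SOURCE A (Python) =====
-- from typing import List, Optional, Tuple
--
-- def format_orderbook_display(
--     yes_bids: List[List[int]],
--     no_bids: List[List[int]],
--     levels: int = 5
-- ) -> str:
--     """
--     Format orderbook for display (debugging/logging).
--
--     Args:
--         yes_bids: YES side bids
--         no_bids: NO side bids
--         levels: Number of levels to show from each side
--
--     Returns:
--         Formatted string representation
--     """
--     lines = []
--     lines.append("=" * 50)
--     lines.append("         YES BIDS          |          NO BIDS")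
--     lines.append("    Price    Qty    Cum    |    Price    Qty    Cum")
--     lines.append("-" * 50)
--
--     # Get top N levels (reversed since we want best first)
--     yes_top = list(reversed(yes_bids[-levels:])) if yes_bids else []
--     no_top = list(reversed(no_bids[-levels:])) if no_bids else []
--
--     # Calculate cumulative quantities
--     yes_cum = 0
--     no_cum = 0
--
--     max_rows = max(len(yes_top), len(no_top))
--
--     for i in range(max_rows):
--         # YES side
--         if i < len(yes_top):
--             price, qty = yes_top[i]
--             yes_cum += qty
--             yes_str = f"    {price:>3}¢  {qty:>6}  {yes_cum:>6}"
--         else: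
--             yes_str = " " * 24
--
--         # NO side
--         if i < len(no_top):
--             price, qty = no_top[i]
--             no_cum += qty
--             no_str = f"    {price:>3}¢  {qty:>6}  {no_cum:>6}"
--         else:
--             no_str = ""
--
--         lines.append(f"{yes_str} | {no_str}")
--
--     lines.append("=" * 50)
--
--     return "\n".join(lines)
-- ===== SOURCE B (Python) =====
-- from typing import List
--
--
-- def _column(rows):
--     """Render one side's rows with a running cumulative quantity."""
--     out = []
--     cum = 0
--     for price, qty in rows:
--         cum += qty
--         out.append(f"    {price:>3}¢  {qty:>6}  {cum:>6}")
--     return out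
--
--
-- def format_orderbook_display(
--     yes_bids: List[List[int]],
--     no_bids: List[List[int]],
--     levels: int = 5
-- ) -> str:
--     yes_top = list(reversed(yes_bids[-levels:])) if yes_bids else []
--     no_top = list(reversed(no_bids[-levels:])) if no_bids else []
--
--     yes_col = _column(yes_top)
--     no_col = _column(no_top)
--     if len(yes_col) < len(no_col):
--         yes_col = yes_col + [" " * 24] * (len(no_col) - len(yes_col))
--     else:
--         no_col = no_col + [""] * (len(yes_col) - len(no_col))
--
--     return "\n".join(
--         ["=" * 50,
--          "         YES BIDS          |          NO BIDS",
--          "    Price    Qty    Cum    |    Price    Qty    Cum",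
--          "-" * 50]
--         + [f"{y} | {n}" for y, n in zip(yes_col, no_col)]
--         + ["=" * 50]
--     )
-- ===== Notes on version B (the rewrite author's own statement) =====
-- stated objective: alternative
-- what changed: Replaced A's single interleaved indexed loop over range(max_rows) carrying two running cumulative accumulators with per-row presence branches by a build-columns-then-combine decomposition: each side is rendered separately into its own list of formatted rows with its running cumulative, the shorter column is padded with its fallback, and the rows are zipped and joined.
import Mathlib
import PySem

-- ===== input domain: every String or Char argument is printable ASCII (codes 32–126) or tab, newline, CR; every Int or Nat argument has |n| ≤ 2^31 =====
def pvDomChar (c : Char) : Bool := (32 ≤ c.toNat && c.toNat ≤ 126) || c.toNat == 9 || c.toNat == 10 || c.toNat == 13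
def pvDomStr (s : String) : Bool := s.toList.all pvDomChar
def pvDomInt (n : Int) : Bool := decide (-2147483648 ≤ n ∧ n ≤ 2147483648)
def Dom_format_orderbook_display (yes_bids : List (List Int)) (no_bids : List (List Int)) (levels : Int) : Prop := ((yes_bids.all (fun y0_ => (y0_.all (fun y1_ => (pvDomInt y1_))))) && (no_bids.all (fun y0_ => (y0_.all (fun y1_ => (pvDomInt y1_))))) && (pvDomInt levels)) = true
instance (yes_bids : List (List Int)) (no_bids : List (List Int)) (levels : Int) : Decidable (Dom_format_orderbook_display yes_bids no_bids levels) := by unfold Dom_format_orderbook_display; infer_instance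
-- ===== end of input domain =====

-- B re-decomposes A's single interleaved indexed loop (two running accumulators, per-row
-- branching) into build-each-column-then-pad-and-zip; same output, similar cost (objective: alternative).


-- ===== shared primitive helpers (identical f-string / slicing code in both Pythons) =====
-- str.__format__ '>w' right-justify: pad with spaces on the left to width w (exact for our args)
def pvRjust (cs : List Char) (w : Nat) : List Char := List.replicate (w - cs.length) ' ' ++ cs

-- f"    {price:>3}¢  {qty:>6}  {cum:>6}" (identical in Source A and Source B)
def pvRow (price qty cum : Int) : String :=
  String.mk ("    ".toList ++ pvRjust (PySem.Int.toChars price) 3 ++ "¢  ".toList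
    ++ pvRjust (PySem.Int.toChars qty) 6 ++ "  ".toList ++ pvRjust (PySem.Int.toChars cum) 6)

-- "price, qty = row": exact for length-2 rows; Python raises ValueError otherwise (excluded by Pre_)
def pvUnpack2 : List Int → Int × Int
  | [p, q] => (p, q)
  | _ => (0, 0)

def pvSpaces24 : String := String.mk (List.replicate 24 ' ')   -- " " * 24
def pvEqLine : String := String.mk (List.replicate 50 '=')     -- "=" * 50
def pvDashLine : String := String.mk (List.replicate 50 '-')   -- "-" * 50
def pvHdr1 : String := "         YES BIDS          |          NO BIDS"
def pvHdr2 : String := "    Price    Qty    Cum    |    Price    Qty    Cum"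

-- list(reversed(bids[-levels:])) if bids else []   (identical in Source A and Source B)
def pvTop (bids : List (List Int)) (levels : Int) : List (List Int) :=
  if bids ≠ [] then (PySem.List.slice bids (some (-levels)) none).reverse else []

-- ===== PORT A =====
-- A's for-loop over range(max(len yes_top, len no_top)): at step i the loop reads position i of
-- each list (or its fallback) and carries the two cumulative sums; ported as the structural
-- recursion over the two remaining suffixes with the same (yes_cum, no_cum) state.
def pvALoop : List (List Int) → List (List Int) → Int → Int → List String
  | [], [], _, _ => []
  | y :: yt, [], yc, nc =>
      let (p, q) := pvUnpack2 y
      (pvRow p q (yc + q) ++ " | " ++ "") :: pvALoop yt [] (yc + q) nc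
  | [], n :: nt, yc, nc =>
      let (p, q) := pvUnpack2 n
      (pvSpaces24 ++ " | " ++ pvRow p q (nc + q)) :: pvALoop [] nt yc (nc + q)
  | y :: yt, n :: nt, yc, nc =>
      let (py, qy) := pvUnpack2 y
      let (pn, qn) := pvUnpack2 n
      (pvRow py qy (yc + qy) ++ " | " ++ pvRow pn qn (nc + qn)) :: pvALoop yt nt (yc + qy) (nc + qn)

def format_orderbook_display (yes_bids : List (List Int)) (no_bids : List (List Int)) (levels : Int) : String :=
  let yes_top := pvTop yes_bids levels
  let no_top := pvTop no_bids levels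
  PySem.Str.join "\n" ([pvEqLine, pvHdr1, pvHdr2, pvDashLine] ++ pvALoop yes_top no_top 0 0 ++ [pvEqLine])

-- ===== PORT B =====
-- _column(rows): one side rendered on its own, running cumulative
def pvColumn : Int → List (List Int) → List String
  | _, [] => []
  | cum, r :: rs =>
      let (p, q) := pvUnpack2 r
      pvRow p q (cum + q) :: pvColumn (cum + q) rs

-- pad the shorter column with its fallback, then zip and join the rows
def pvMergeRows (yc nc : List String) : List String :=
  let (yc', nc') :=
    if yc.length < nc.length
    then (yc ++ List.replicate (nc.length - yc.length) pvSpaces24, nc)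
    else (yc, nc ++ List.replicate (yc.length - nc.length) "")
  (yc'.zip nc').map (fun p => p.1 ++ " | " ++ p.2)

def format_orderbook_display_alt (yes_bids : List (List Int)) (no_bids : List (List Int)) (levels : Int) : String :=
  let yes_top := pvTop yes_bids levels
  let no_top := pvTop no_bids levels
  PySem.Str.join "\n"
    ([pvEqLine, pvHdr1, pvHdr2, pvDashLine]
      ++ pvMergeRows (pvColumn 0 yes_top) (pvColumn 0 no_top) ++ [pvEqLine])

-- ===== PRECONDITION & SPEC =====
-- Pre_ excludes exactly the inputs on which some displayed row is not a [price, qty] pair: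
-- there Python A's tuple unpacking raises ValueError (B raises the same way).
def Pre_format_orderbook_display (yes_bids : List (List Int)) (no_bids : List (List Int)) (levels : Int) : Prop :=
  (∀ r ∈ PySem.List.slice yes_bids (some (-levels)) none, r.length = 2) ∧
  (∀ r ∈ PySem.List.slice no_bids (some (-levels)) none, r.length = 2)
instance (yes_bids : List (List Int)) (no_bids : List (List Int)) (levels : Int) : Decidable (Pre_format_orderbook_display yes_bids no_bids levels) := by unfold Pre_format_orderbook_display; infer_instance

def pvWitness_format_orderbook_display : List (List Int) × List (List Int) × Int :=
  ([[10, 5], [12, 3]], [[90, 7]], 2)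

def Spec_format_orderbook_display (yes_bids : List (List Int)) (no_bids : List (List Int)) (levels : Int) (out : String) : Prop := out = format_orderbook_display_alt yes_bids no_bids levels
instance (yes_bids : List (List Int)) (no_bids : List (List Int)) (levels : Int) (out : String) : Decidable (Spec_format_orderbook_display yes_bids no_bids levels out) := by unfold Spec_format_orderbook_display; infer_instance

-- ===== CLAIM (what is proved, stated in full; the proofs are below) =====
def Claim_equal_format_orderbook_display : Prop := ∀ (yes_bids : List (List Int)) (no_bids : List (List Int)) (levels : Int), Dom_format_orderbook_display yes_bids no_bids levels → Pre_format_orderbook_display yes_bids no_bids levels → Spec_format_orderbook_display yes_bids no_bids levels (format_orderbook_display yes_bids no_bids levels)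

-- ===== LEMMAS AND PROOFS =====
-- the common shape of both merged bodies: one fallback-padded combining recursion
def pvMA : List String → List String → List String
  | [], [] => []
  | y :: ys, [] => (y ++ " | " ++ "") :: pvMA ys []
  | [], n :: ns => (pvSpaces24 ++ " | " ++ n) :: pvMA [] ns
  | y :: ys, n :: ns => (y ++ " | " ++ n) :: pvMA ys ns

theorem pvALoop_eq_pvMA (yt nt : List (List Int)) (yc nc : Int) :
    pvALoop yt nt yc nc = pvMA (pvColumn yc yt) (pvColumn nc nt) := by
  fun_induction pvALoop yt nt yc nc with
  | case1 => simp [pvColumn, pvMA]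
  | case2 yc nc y yt p q hpq ih => simp [pvColumn, pvMA, hpq, ih]
  | case3 yc nc n nt p q hpq ih => simp [pvColumn, pvMA, hpq, ih]
  | case4 yc nc y yt n nt py qy h1 pn qn h2 ih => simp [pvColumn, pvMA, h1, h2, ih]

theorem pvPadLeft (ns : List String) :
    ((List.replicate ns.length pvSpaces24).zip ns).map (fun p => p.1 ++ " | " ++ p.2) = pvMA [] ns := by
  induction ns with
  | nil => simp [pvMA]
  | cons n ns ih => simp [pvMA, List.replicate_succ, ih]

theorem pvPadA (ys ns : List String) (h : ys.length ≤ ns.length) :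
    ((ys ++ List.replicate (ns.length - ys.length) pvSpaces24).zip ns).map (fun p => p.1 ++ " | " ++ p.2)
      = pvMA ys ns := by
  induction ys generalizing ns with
  | nil => simpa using pvPadLeft ns
  | cons y ys ih =>
      cases ns with
      | nil => simp at h
      | cons n ns =>
          simp only [List.length_cons, Nat.succ_sub_succ, List.cons_append, List.zip_cons_cons,
            List.map_cons, pvMA]
          exact congrArg _ (ih ns (by simpa using h))

theorem pvPadRight (ys : List String) :
    (ys.zip (List.replicate ys.length "")).map (fun p => p.1 ++ " | " ++ p.2) = pvMA ys [] := by
  induction ys with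
  | nil => simp [pvMA]
  | cons y ys ih => simp [pvMA, List.replicate_succ, ih]

theorem pvPadB (ys ns : List String) (h : ns.length ≤ ys.length) :
    ((ys).zip (ns ++ List.replicate (ys.length - ns.length) "")).map (fun p => p.1 ++ " | " ++ p.2)
      = pvMA ys ns := by
  induction ns generalizing ys with
  | nil => simpa using pvPadRight ys
  | cons n ns ih =>
      cases ys with
      | nil => simp at h
      | cons y ys =>
          simp only [List.length_cons, Nat.succ_sub_succ, List.cons_append, List.zip_cons_cons,
            List.map_cons, pvMA]
          exact congrArg _ (ih ys (by simpa using h))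

theorem pvMergeRows_eq_pvMA (yc nc : List String) : pvMergeRows yc nc = pvMA yc nc := by
  unfold pvMergeRows
  split_ifs with h
  · exact pvPadA yc nc (Nat.le_of_lt h)
  · exact pvPadB yc nc (Nat.le_of_not_lt h)

-- ===== VERDICT (by name: the statement is the Claim_ definition above) =====
theorem format_orderbook_display_spec : Claim_equal_format_orderbook_display := by
  intro yb nb lv _ _
  unfold Spec_format_orderbook_display format_orderbook_display format_orderbook_display_alt
  simp only [pvMergeRows_eq_pvMA, pvALoop_eq_pvMA]
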